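-- pv_equiv track=rewrite | github.com/AckbadP/scrim-trimmer | src/chat_analyzer.py | pair_cd_wf
-- ===== SOURCE A (Python) =====
-- from typing import List, Set, Tuple
--
-- def pair_cd_wf(
--     cd_timestamps: List[int],
--     wf_timestamps: List[int],
-- ) -> List[Tuple[int, int]]:
--     """
--     Pair CD and WF timestamps into (start, end) clip boundaries.
--
--     Pairing rules:
--     - For each WF (in order), find all CDs that occurred after the previous WF
--       and before the current WF.
--     - Use the most recent of those CDs as the clip start.
--     - CDs that appear before an eligible window are discarded.
--     - Each CD and WF is used at most once.
--
--     Args: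
--         cd_timestamps: Sorted list of seconds where a new CD was detected.
--         wf_timestamps: Sorted list of seconds where a new WF was detected.
--
--     Returns:
--         List of (cd_time, wf_time) tuples representing clip boundaries.
--     """
--     clips: List[Tuple[int, int]] = []
--     last_wf_used = -1  # sentinel: no WF used yet
--
--     for wf_time in sorted(wf_timestamps):
--         # Eligible CDs: appeared after the last used WF, and before this WF
--         eligible = [cd for cd in cd_timestamps if last_wf_used < cd < wf_time]
--         if eligible:
--             cd_time = max(eligible)  # most recent CD
--             clips.append((cd_time, wf_time))
--             last_wf_used = wf_time
--         # If no eligible CD exists for this WF, skip this WF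
--
--     return clips
-- ===== SOURCE B (Python) =====
-- from typing import List, Tuple
--
--
-- def pair_cd_wf(
--     cd_timestamps: List[int],
--     wf_timestamps: List[int],
-- ) -> List[Tuple[int, int]]:
--     """Two-pointer over sorted CDs: for each WF (ascending) the candidate CD is
--     the largest CD strictly below it; pair it if it is newer than the last used WF."""
--     cds = sorted(cd_timestamps)
--     clips: List[Tuple[int, int]] = []
--     last_wf_used = -1  # sentinel: no WF used yet
--     j = 0
--     cand = None  # largest CD seen so far (i.e. largest CD below the current WF)
--     for wf_time in sorted(wf_timestamps):
--         while j < len(cds) and cds[j] < wf_time: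
--             cand = cds[j]
--             j += 1
--         if cand is not None and cand > last_wf_used:
--             clips.append((cand, wf_time))
--             last_wf_used = wf_time
--     return clips
-- ===== Notes on version B (the rewrite author's own statement) =====
-- stated objective: faster
-- what changed: Replaces the per-WF full scan of cd_timestamps (list comprehension + max) by sorting the CDs once and sweeping a single two-pointer/running-candidate over them, so each CD is examined once overall.
import Mathlib
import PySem

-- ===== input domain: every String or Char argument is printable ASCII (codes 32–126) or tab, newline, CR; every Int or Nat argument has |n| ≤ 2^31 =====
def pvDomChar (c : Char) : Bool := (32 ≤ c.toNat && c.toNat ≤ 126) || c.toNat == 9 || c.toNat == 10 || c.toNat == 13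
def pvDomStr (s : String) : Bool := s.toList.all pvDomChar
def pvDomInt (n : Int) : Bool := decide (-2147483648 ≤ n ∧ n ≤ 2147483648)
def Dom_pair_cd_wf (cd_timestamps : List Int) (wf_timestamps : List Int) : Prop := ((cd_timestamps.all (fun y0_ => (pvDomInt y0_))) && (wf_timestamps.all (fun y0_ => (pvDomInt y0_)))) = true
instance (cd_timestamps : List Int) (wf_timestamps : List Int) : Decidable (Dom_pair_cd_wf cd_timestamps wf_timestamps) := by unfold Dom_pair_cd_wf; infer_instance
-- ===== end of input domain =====

-- B replaces A's per-WF full scan of the CD list (comprehension + max) by one sort of the CDs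
-- and a single two-pointer sweep carrying the running candidate CD; objective: faster (asymptotic).

-- ===== PORT A =====
-- literal transliteration of A: fold over sorted(wf_timestamps); per WF a filter (the list
-- comprehension) and max (guarded by nonemptiness, ported as a match on max?).
def pair_cd_wf (cd_timestamps : List Int) (wf_timestamps : List Int) : List (Int × Int) :=
  ((PySem.List.sorted wf_timestamps (fun x => x) false).foldl
    (fun (st : List (Int × Int) × Int) wf_time =>
      let eligible := cd_timestamps.filter (fun cd => decide (st.2 < cd ∧ cd < wf_time))
      match PySem.List.max? eligible (fun x => x) with
      | some cd_time => (st.1 ++ [(cd_time, wf_time)], wf_time)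
      | none => st)
    ([], -1)).1

-- ===== PORT B =====
-- the inner `while j < len(cds) and cds[j] < wf_time` pointer loop of Source B: the remaining
-- suffix of the sorted CD list plays the role of the index j; `cand` is the last CD passed.
def pvAdvance (rest : List Int) (wf : Int) (cand : Option Int) : List Int × Option Int :=
  match rest with
  | [] => ([], cand)
  | c :: t => if c < wf then pvAdvance t wf (some c) else (c :: t, cand)

-- literal transliteration of B: sort the CDs once, then fold over sorted(wf_timestamps)
-- with state (clips, remaining CDs, candidate, last_wf_used).
def pair_cd_wf_alt (cd_timestamps : List Int) (wf_timestamps : List Int) : List (Int × Int) :=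
  let cds := PySem.List.sorted cd_timestamps (fun x => x) false
  ((PySem.List.sorted wf_timestamps (fun x => x) false).foldl
    (fun (st : List (Int × Int) × List Int × Option Int × Int) wf_time =>
      let adv := pvAdvance st.2.1 wf_time st.2.2.1
      match adv.2 with
      | some c =>
          if st.2.2.2 < c then (st.1 ++ [(c, wf_time)], adv.1, adv.2, wf_time)
          else (st.1, adv.1, adv.2, st.2.2.2)
      | none => (st.1, adv.1, adv.2, st.2.2.2))
    ([], cds, none, -1)).1

-- ===== PRECONDITION & SPEC =====
def Spec_pair_cd_wf (cd_timestamps : List Int) (wf_timestamps : List Int) (out : List (Int × Int)) : Prop := out = pair_cd_wf_alt cd_timestamps wf_timestamps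
instance (cd_timestamps : List Int) (wf_timestamps : List Int) (out : List (Int × Int)) : Decidable (Spec_pair_cd_wf cd_timestamps wf_timestamps out) := by unfold Spec_pair_cd_wf; infer_instance

-- ===== CLAIM (what is proved, stated in full; the proofs are below) =====
def Claim_equal_pair_cd_wf : Prop := ∀ (cd_timestamps : List Int) (wf_timestamps : List Int), Dom_pair_cd_wf cd_timestamps wf_timestamps → Spec_pair_cd_wf cd_timestamps wf_timestamps (pair_cd_wf cd_timestamps wf_timestamps)

-- ===== LEMMAS AND PROOFS =====

-- pvAdvance, started with the last element of the already-consumed prefix `done` as candidate,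
-- drops exactly the takeWhile-prefix and ends with the last element of the extended prefix.
theorem pvAdvance_spec : ∀ (rest : List Int) (wf : Int) (done : List Int),
    pvAdvance rest wf done.getLast? =
      (rest.dropWhile (fun c => decide (c < wf)),
       (done ++ rest.takeWhile (fun c => decide (c < wf))).getLast?) := by
  intro rest
  induction rest with
  | nil => intro wf done; simp [pvAdvance]
  | cons c t ih =>
    intro wf done
    by_cases h : c < wf
    · have hc : some c = (done ++ [c]).getLast? := by simp
      have := ih wf (done ++ [c])
      simp only [pvAdvance, if_pos h, hc, this, List.takeWhile_cons, List.dropWhile_cons,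
        decide_eq_true h, List.append_assoc]
      simp
    · simp [pvAdvance, h]

theorem filter_eq_takeWhile_of_sorted : ∀ (l : List Int) (wf : Int), l.Pairwise (· ≤ ·) →
    l.filter (fun c => decide (c < wf)) = l.takeWhile (fun c => decide (c < wf)) := by
  intro l
  induction l with
  | nil => intro wf _; rfl
  | cons c t ih =>
    intro wf hp
    rcases List.pairwise_cons.mp hp with ⟨hhd, htl⟩
    by_cases h : c < wf
    · simp [h, ih wf htl]
    · have hdec : (decide (c < wf)) = false := by simp [h]
      simp only [List.filter_cons, List.takeWhile_cons, hdec, Bool.false_eq_true, if_false]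
      apply List.filter_eq_nil_iff.mpr
      intro x hx
      simp only [decide_eq_true_eq]
      intro hxwf
      exact h (lt_of_le_of_lt (hhd x hx) hxwf)

theorem getLast?_isMax : ∀ (l : List Int) (m : Int), l.Pairwise (· ≤ ·) →
    l.getLast? = some m → ∀ x ∈ l, x ≤ m := by
  intro l
  induction l with
  | nil => intro m _ h; simp at h
  | cons c t ih =>
    intro m hp hl x hx
    rcases List.pairwise_cons.mp hp with ⟨hhd, htl⟩
    cases t with
    | nil =>
      simp at hl hx; omega
    | cons d t' =>
      have hl' : (d :: t').getLast? = some m := by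
        simpa [List.getLast?_cons_cons] using hl
      rcases List.mem_cons.mp hx with rfl | hx'
      · exact le_trans (hhd d (by simp)) (ih m htl hl' d (by simp))
      · exact ih m htl hl' x hx'

-- The main loop invariant: with the sorted CD list split as done ++ rest, everything in done
-- below every remaining WF, and B's candidate = the last consumed CD, the two folds produce
-- the same clip list.
theorem pair_main : ∀ (cds : List Int) (ws : List Int) (clips : List (Int × Int)) (last : Int)
    (done rest : List Int),
    done ++ rest = PySem.List.sorted cds (fun x => x) false →
    (∀ x ∈ done, ∀ w ∈ ws, x < w) →
    ws.Pairwise (· ≤ ·) →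
    (ws.foldl
      (fun (st : List (Int × Int) × Int) wf_time =>
        let eligible := cds.filter (fun cd => decide (st.2 < cd ∧ cd < wf_time))
        match PySem.List.max? eligible (fun x => x) with
        | some cd_time => (st.1 ++ [(cd_time, wf_time)], wf_time)
        | none => st)
      (clips, last)).1 =
    (ws.foldl
      (fun (st : List (Int × Int) × List Int × Option Int × Int) wf_time =>
        let adv := pvAdvance st.2.1 wf_time st.2.2.1
        match adv.2 with
        | some c =>
            if st.2.2.2 < c then (st.1 ++ [(c, wf_time)], adv.1, adv.2, wf_time)
            else (st.1, adv.1, adv.2, st.2.2.2)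
        | none => (st.1, adv.1, adv.2, st.2.2.2))
      (clips, rest, done.getLast?, last)).1 := by
  intro cds ws
  induction ws with
  | nil => intro clips last done rest _ _ _; rfl
  | cons wf ws' ih =>
    intro clips last done rest hsplit hdone hws
    rcases List.pairwise_cons.mp hws with ⟨hwf_le, hws'⟩
    have hsorted : (done ++ rest).Pairwise (· ≤ ·) := by
      rw [hsplit]; exact PySem.List.sorted_pairwise cds (fun x => x)
    have hrest_sorted : rest.Pairwise (· ≤ ·) := (List.pairwise_append.mp hsorted).2.1
    have hperm : (done ++ rest).Perm cds := by rw [hsplit]; exact PySem.List.sorted_perm _ _ _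
    set taken := rest.takeWhile (fun c => decide (c < wf)) with htaken
    set rest' := rest.dropWhile (fun c => decide (c < wf)) with hrest'
    set done' := done ++ taken with hdone'
    have hadv : pvAdvance rest wf done.getLast? = (rest', done'.getLast?) :=
      pvAdvance_spec rest wf done
    have hsplit' : done' ++ rest' = PySem.List.sorted cds (fun x => x) false := by
      rw [hdone', List.append_assoc, htaken, hrest', List.takeWhile_append_dropWhile, hsplit]
    -- done' is exactly the elements of sorted cds that are < wf
    have hfilter : (done ++ rest).filter (fun c => decide (c < wf)) = done' := by
      rw [List.filter_append]
      have h1 : done.filter (fun c => decide (c < wf)) = done := by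
        apply List.filter_eq_self.mpr
        intro x hx
        exact decide_eq_true (hdone x hx wf (by simp))
      rw [h1, filter_eq_takeWhile_of_sorted rest wf hrest_sorted]
    have hdone'_sorted : done'.Pairwise (· ≤ ·) := by
      rw [← hfilter]; exact hsorted.filter _
    have hdone'_lt : ∀ x ∈ done', x < wf := by
      intro x hx
      rw [← hfilter] at hx
      simpa using (List.of_mem_filter hx)
    have hdone'_max : ∀ x, x ∈ done ++ rest → x < wf → x ∈ done' := by
      intro x hx hxwf
      rw [← hfilter]
      exact List.mem_filter.mpr ⟨hx, by simpa using hxwf⟩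
    have hdone'_next : ∀ x ∈ done', ∀ w ∈ ws', x < w := by
      intro x hx w hw
      exact lt_of_lt_of_le (hdone'_lt x hx) (hwf_le w hw)
    -- the two step results
    simp only [List.foldl_cons]
    cases hc : done'.getLast? with
    | none =>
      -- no CD below wf at all
      have hd' : done' = [] := List.getLast?_eq_none_iff.mp hc
      have hnone : ∀ cd ∈ cds, ¬ (last < cd ∧ cd < wf) := by
        intro cd hcd hcontra
        have : cd ∈ done' := hdone'_max cd (hperm.mem_iff.mpr hcd) hcontra.2
        simp [hd'] at this
      have helig : cds.filter (fun cd => decide (last < cd ∧ cd < wf)) = [] := by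
        apply List.filter_eq_nil_iff.mpr
        intro x hx
        simpa using hnone x hx
      simp only [hadv, hc, helig]
      have := ih clips last done' rest' hsplit' (by simp [hd']) hws'
      rw [hc] at this
      exact this
    | some m =>
      have hm_mem : m ∈ done' := List.mem_of_getLast? hc
      have hm_lt : m < wf := hdone'_lt m hm_mem
      have hm_cds : m ∈ cds := hperm.mem_iff.mp (by
        have : m ∈ done' ++ rest' := List.mem_append.mpr (Or.inl hm_mem)
        rw [hdone', List.append_assoc, htaken, hrest', List.takeWhile_append_dropWhile] at this
        exact this)
      have hm_max : ∀ x ∈ cds, x < wf → x ≤ m := by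
        intro x hx hxwf
        exact getLast?_isMax done' m hdone'_sorted hc x
          (hdone'_max x (hperm.mem_iff.mpr hx) hxwf)
      by_cases hlast : last < m
      · -- eligible nonempty with max m
        have hm_elig : m ∈ cds.filter (fun cd => decide (last < cd ∧ cd < wf)) :=
          List.mem_filter.mpr ⟨hm_cds, by simp [hlast, hm_lt]⟩
        obtain ⟨v, hv⟩ : ∃ v, PySem.List.max? (cds.filter (fun cd => decide (last < cd ∧ cd < wf)))
            (fun x : Int => x) = some v := by
          cases hvv : PySem.List.max? (cds.filter (fun cd => decide (last < cd ∧ cd < wf)))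
              (fun x : Int => x) with
          | none =>
            have := (PySem.List.max?_eq_none_iff _ _).mp hvv
            rw [this] at hm_elig; simp at hm_elig
          | some v => exact ⟨v, rfl⟩
        have hv_mem := PySem.List.max?_mem hv
        rcases List.mem_filter.mp hv_mem with ⟨hv_cds, hv_cond⟩
        have hv_lt : v < wf := by simp at hv_cond; exact hv_cond.2
        have hv_le_m : v ≤ m := hm_max v hv_cds hv_lt
        have hm_le_v : m ≤ v := PySem.List.max?_isMax hv m hm_elig
        have hvm : v = m := le_antisymm hv_le_m hm_le_v
        simp only [hadv, hc, hv, hvm, if_pos hlast]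
        have := ih (clips ++ [(m, wf)]) wf done' rest' hsplit' hdone'_next hws'
        rw [hc] at this
        exact this
      · -- every eligible CD would be ≤ m ≤ last: eligible empty, both skip
        have helig : cds.filter (fun cd => decide (last < cd ∧ cd < wf)) = [] := by
          apply List.filter_eq_nil_iff.mpr
          intro x hx
          simp only [decide_eq_true_eq, not_and]
          intro hlx hxwf
          exact absurd (lt_of_lt_of_le hlx (hm_max x hx hxwf)) hlast
        have hmax : PySem.List.max? (cds.filter (fun cd => decide (last < cd ∧ cd < wf)))
            (fun x : Int => x) = none := by
          rw [helig]; exact (PySem.List.max?_eq_none_iff _ _).mpr rfl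
        simp only [hadv, hc, hmax, if_neg hlast]
        have := ih clips last done' rest' hsplit' hdone'_next hws'
        rw [hc] at this
        exact this

-- ===== VERDICT (by name: the statement is the Claim_ definition above) =====
theorem pair_cd_wf_spec : Claim_equal_pair_cd_wf := by
  intro cds wfs _
  unfold Spec_pair_cd_wf pair_cd_wf pair_cd_wf_alt
  have h := pair_main cds (PySem.List.sorted wfs (fun x => x) false) [] (-1) []
    (PySem.List.sorted cds (fun x => x) false) rfl (by simp)
    (PySem.List.sorted_pairwise wfs (fun x => x))
  simpa using h
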